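-- pv_equiv track=rewrite | github.com/openstack/nova | nova/db/sqlalchemy/api.py | _ip_range_splitter
-- ===== SOURCE A (Python) =====
-- def _ip_range_splitter(ips, block_size=256):
--     """Yields blocks of IPs no more than block_size elements long."""
--     out = []
--     count = 0
--     for ip in ips:
--         out.append(ip['address'])
--         count += 1
--
--         if count > block_size - 1:
--             yield out
--             out = []
--             count = 0
--
--     if out:
--         yield out
-- ===== SOURCE B (Python) =====
-- def _ip_range_splitter(ips, block_size=256):
--     """Yields blocks of IPs no more than block_size elements long."""
--     addrs = [ip['address'] for ip in ips]
--     step = block_size if block_size > 0 else 1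
--     while addrs:
--         yield addrs[:step]
--         addrs = addrs[step:]
-- ===== Notes on version B (the rewrite author's own statement) =====
-- stated objective: idiomatic
-- what changed: Replaces A's stateful out/count accumulator loop with a materialize-then-slice pass: collect all addresses once, then repeatedly yield a step-sized slice and drop it (step = block_size, or 1 when block_size <= 0, reproducing A's per-element yields there).
import Mathlib
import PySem

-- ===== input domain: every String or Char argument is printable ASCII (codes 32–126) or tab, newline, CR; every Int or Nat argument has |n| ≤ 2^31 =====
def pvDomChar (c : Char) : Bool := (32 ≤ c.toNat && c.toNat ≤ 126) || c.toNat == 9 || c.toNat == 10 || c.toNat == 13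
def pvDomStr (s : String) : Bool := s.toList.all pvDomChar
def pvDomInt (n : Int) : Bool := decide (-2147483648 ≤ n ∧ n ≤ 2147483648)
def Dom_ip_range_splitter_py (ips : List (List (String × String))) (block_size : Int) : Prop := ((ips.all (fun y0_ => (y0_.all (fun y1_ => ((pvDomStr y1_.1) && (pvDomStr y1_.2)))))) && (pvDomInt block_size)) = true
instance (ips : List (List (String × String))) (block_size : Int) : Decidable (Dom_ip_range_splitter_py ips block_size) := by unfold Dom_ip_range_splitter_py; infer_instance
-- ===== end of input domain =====

-- B replaces A's stateful out/count accumulator loop with a materialize-then-slice pass (idiomatic; same cost).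

-- ===== PORT A =====
-- ip['address'] (KeyError when absent → excluded by Pre_; `getD "" ` is exact inside Pre_)
def pvAddr (ip : List (String × String)) : String :=
  (PySem.Dict.mk ip).getD "address" ""

-- the generator loop: state (yielded-so-far, out, count); `yield` appends the block
def ip_range_splitter_py (ips : List (List (String × String))) (block_size : Int) : List (List String) :=
  let st := ips.foldl (fun (st : List (List String) × List String × Int) ip =>
    let acc := st.1
    let out := st.2.1 ++ [pvAddr ip]
    let count := st.2.2 + 1
    if count > block_size - 1 then (acc ++ [out], [], 0) else (acc, out, count))
    ([], [], 0)
  if st.2.1 ≠ [] then st.1 ++ [st.2.1] else st.1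

-- ===== PORT B =====
-- `while addrs: yield addrs[:step]; addrs = addrs[step:]`; only called with step ≥ 1,
-- where (x :: rest).drop step = rest.drop (step - 1) (written this way for termination)
def pvChunks : List String → Nat → List (List String)
  | [], _ => []
  | x :: rest, step => (x :: rest).take step :: pvChunks (rest.drop (step - 1)) step
termination_by l _ => l.length
decreasing_by simp only [List.length_drop, List.length_cons]; omega

def ip_range_splitter_py_alt (ips : List (List (String × String))) (block_size : Int) : List (List String) :=
  let addrs := ips.map pvAddr
  let step : Int := if block_size > 0 then block_size else 1
  pvChunks addrs step.toNat

-- ===== PRECONDITION & SPEC =====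
-- Pre_ excludes exactly the inputs where A raises KeyError: some ip lacks the 'address' key (B raises there too).
def Pre_ip_range_splitter_py (ips : List (List (String × String))) (block_size : Int) : Prop :=
  ∀ ip ∈ ips, (PySem.Dict.mk ip).contains "address" = true
instance (ips : List (List (String × String))) (block_size : Int) : Decidable (Pre_ip_range_splitter_py ips block_size) := by unfold Pre_ip_range_splitter_py; infer_instance

def pvWitness_ip_range_splitter_py : (List (List (String × String))) × Int :=
  ([[("address", "10.0.0.1")], [("address", "10.0.0.2")], [("address", "10.0.0.3")]], 2)

def Spec_ip_range_splitter_py (ips : List (List (String × String))) (block_size : Int) (out : List (List String)) : Prop := out = ip_range_splitter_py_alt ips block_size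
instance (ips : List (List (String × String))) (block_size : Int) (out : List (List String)) : Decidable (Spec_ip_range_splitter_py ips block_size out) := by unfold Spec_ip_range_splitter_py; infer_instance

-- ===== CLAIM (what is proved, stated in full; the proofs are below) =====
def Claim_equal_ip_range_splitter_py : Prop := ∀ (ips : List (List (String × String))) (block_size : Int), Dom_ip_range_splitter_py ips block_size → Pre_ip_range_splitter_py ips block_size → Spec_ip_range_splitter_py ips block_size (ip_range_splitter_py ips block_size)

-- ===== LEMMAS AND PROOFS =====

-- pvChunks of a nonempty list, stated without the cons pattern (needs step ≥ 1, as in the port)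
lemma pvChunks_nil (step : Nat) : pvChunks [] step = [] := by rw [pvChunks.eq_def]

lemma pvChunks_ne (l : List String) (step : Nat) (h1 : 1 ≤ step) (h : l ≠ []) :
    pvChunks l step = l.take step :: pvChunks (l.drop step) step := by
  match l with
  | [] => exact absurd rfl h
  | x :: rest =>
    rw [pvChunks.eq_def]
    simp only []
    congr 2
    cases step with
    | zero => omega
    | succ n => simp

-- loop invariant: from a partial block `out` with |out| < step, A's fold produces
-- `acc` followed by the chunking of `out ++ <remaining addresses>`
lemma loop_eq (bs : Int) (step : Nat)
    (hstep : step = (if bs > 0 then bs else 1).toNat)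
    (xs : List String) : ∀ (acc : List (List String)) (out : List String),
    out.length < step →
    (let st := xs.foldl (fun (st : List (List String) × List String × Int) a =>
        let acc := st.1
        let o := st.2.1 ++ [a]
        let c := st.2.2 + 1
        if c > bs - 1 then (acc ++ [o], [], 0) else (acc, o, c))
      (acc, out, (out.length : Int));
     if st.2.1 ≠ [] then st.1 ++ [st.2.1] else st.1)
    = acc ++ pvChunks (out ++ xs) step := by
  have hstep1 : 1 ≤ step := by
    rcases lt_or_ge 0 bs with h | h
    · simp [hstep, if_pos h]; omega
    · simp [hstep, if_neg (not_lt.mpr h)]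
  induction xs with
  | nil =>
    intro acc out hout
    simp only [List.foldl_nil, List.append_nil]
    by_cases h : out = []
    · simp [h, pvChunks_nil]
    · rw [pvChunks_ne out step hstep1 h]
      have : out.take step = out := List.take_of_length_le (le_of_lt hout)
      have hd : out.drop step = [] := List.drop_eq_nil_of_le (le_of_lt hout)
      simp [h, this, hd, pvChunks_nil]
  | cons x rest ih =>
    intro acc out hout
    simp only [List.foldl_cons]
    by_cases hf : (out.length : Int) + 1 > bs - 1
    · -- flush: the block is full, |out| + 1 = step
      have hfull : out.length + 1 = step := by
        rcases lt_or_ge 0 bs with hpos | hneg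
        · have : step = bs.toNat := by simp [hstep, if_pos hpos]
          omega
        · have : step = 1 := by simp [hstep, if_neg (not_lt.mpr hneg)]
          omega
      simp only [if_pos hf]
      have := ih (acc ++ [out ++ [x]]) [] (by simpa using hstep1)
      simp only [List.length_nil, Int.ofNat_zero, List.nil_append] at this
      rw [this]
      rw [pvChunks_ne (out ++ x :: rest) step hstep1 (by simp)]
      have htk : (out ++ x :: rest).take step = out ++ [x] := by
        rw [← hfull]
        rw [show out ++ x :: rest = (out ++ [x]) ++ rest by simp]
        rw [List.take_append_of_le_length (by simp)]
        simp
      have hdr : (out ++ x :: rest).drop step = rest := by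
        rw [← hfull]
        rw [show out ++ x :: rest = (out ++ [x]) ++ rest by simp]
        rw [List.drop_append_of_le_length (by simp)]
        simp
      rw [htk, hdr]
      simp
    · -- no flush: |out| + 1 < step, keep accumulating
      have hlt : out.length + 1 < step := by
        have hb : (out.length : Int) + 1 ≤ bs - 1 := by omega
        rcases lt_or_ge 0 bs with hpos | hneg
        · have : step = bs.toNat := by simp [hstep, if_pos hpos]
          omega
        · omega
      simp only [if_neg hf]
      have := ih acc (out ++ [x]) (by simpa using hlt)
      simp only [List.length_append, List.length_cons, List.length_nil] at this ⊢
      rw [show ((out.length : Int) + 1) = (((out.length + 1 : Nat)) : Int) by push_cast; ring]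
      simpa using this

-- ===== VERDICT (by name: the statement is the Claim_ definition above) =====
theorem ip_range_splitter_py_spec : Claim_equal_ip_range_splitter_py := by
  intro ips bs _ _
  unfold Spec_ip_range_splitter_py ip_range_splitter_py ip_range_splitter_py_alt
  have h := loop_eq bs ((if bs > 0 then bs else 1)).toNat rfl (ips.map pvAddr) [] []
    (by rcases lt_or_ge 0 bs with h | h
        · simp [if_pos h]; omega
        · simp [if_neg (not_lt.mpr h)])
  simp only [List.length_nil, Int.ofNat_zero, List.nil_append] at h
  have e : (List.foldl (fun (st : List (List String) × List String × Int) ip =>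
        if st.2.2 + 1 > bs - 1 then (st.1 ++ [st.2.1 ++ [pvAddr ip]], ([] : List String), (0 : Int))
        else (st.1, st.2.1 ++ [pvAddr ip], st.2.2 + 1)) ([], [], 0) ips)
      = (List.foldl (fun (st : List (List String) × List String × Int) a =>
        if st.2.2 + 1 > bs - 1 then (st.1 ++ [st.2.1 ++ [a]], ([] : List String), (0 : Int))
        else (st.1, st.2.1 ++ [a], st.2.2 + 1)) ([], [], 0) (ips.map pvAddr)) :=
    by rw [List.foldl_map]
  simp only [e]
  simpa using h
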